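-- pv_equiv track=rewrite | github.com/Katerina676/algoritms | sprint5/heap_sort1.py | sift_up
-- ===== SOURCE A (Python) =====
-- def sift_up(heap, idx):
--     if idx == 1:
--         return idx
--     parent = idx // 2
--     if heap[parent] > heap[idx]:
--         heap[parent], heap[idx] = heap[idx], heap[parent]
--         idx = sift_up(heap, parent)
--     return idx
-- ===== SOURCE B (Python) =====
-- def sift_up(heap, idx):
--     # Hole/shift variant: carry the sifted value, shift greater parents down,
--     # write the value once at its final slot.  Mutates heap like A does for
--     # positions above the root; treats non-positive indices as already placed.
--     v = heap[idx]
--     i = idx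
--     while i > 1 and heap[i // 2] > v:
--         heap[i] = heap[i // 2]
--         i //= 2
--     heap[i] = v
--     return i
-- ===== Notes on version B (the rewrite author's own statement) =====
-- stated objective: alternative
-- what changed: Recursive pairwise-swap sift-up is replaced by an iterative hole-shift: carry the sifted value, shift each greater parent down with a single write, and store the value once at its final slot (one write per level instead of three, loop instead of recursion).
-- intended difference: For idx < -1 with heap[idx//2] > heap[idx] (negative-index wraparound), A swaps elements at Python's wrapped negative positions and returns the end of that swap chain, while B treats any index not strictly above the root as already placed and returns idx unchanged; sifting at a negative heap index is meaningless for a 1-based heap, so B's no-op is the intended behaviour. — e.g. on sift_up([0, 3, 5], -2): A returns -1, B returns -2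
-- outside the precondition, e.g. on sift_up([5], 1): A returns 1, B raises IndexError; on sift_up([], 1): A returns 1, B raises IndexError
import Mathlib
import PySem

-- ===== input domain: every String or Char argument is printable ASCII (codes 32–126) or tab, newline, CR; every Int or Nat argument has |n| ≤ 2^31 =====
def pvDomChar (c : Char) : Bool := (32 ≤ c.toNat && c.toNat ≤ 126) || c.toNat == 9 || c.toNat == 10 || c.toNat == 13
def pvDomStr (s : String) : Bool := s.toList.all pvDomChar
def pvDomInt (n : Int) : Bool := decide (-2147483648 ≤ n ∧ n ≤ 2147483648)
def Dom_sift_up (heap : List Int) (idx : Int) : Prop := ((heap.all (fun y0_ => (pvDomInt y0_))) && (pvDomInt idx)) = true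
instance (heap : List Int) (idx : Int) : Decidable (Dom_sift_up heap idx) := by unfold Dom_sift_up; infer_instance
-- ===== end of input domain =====

-- B replaces A's recursive pairwise-swap sift-up by an iterative hole-shift (carry the value,
-- shift greater parents down, one final write); equivalence is about the RETURN value only —
-- both Pythons mutate `heap` in place (identically for idx ≥ 1).


-- ===== PORT A =====
-- literal port of A; fuel only makes the recursion structural (idx.natAbs + 2 steps always suffice:
-- the recursion moves idx // 2 towards 1 resp. towards -1/0)
def siftA (fuel : Nat) (heap : List Int) (idx : Int) : Int :=
  match fuel with
  | 0 => idx
  | fuel + 1 =>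
    if idx = 1 then idx
    else
      let parent := PySem.Int.floordiv idx 2
      match PySem.List.pyGet? heap parent, PySem.List.pyGet? heap idx with
      | some hp, some hi =>
        if hp > hi then
          -- heap[parent], heap[idx] = heap[idx], heap[parent]
          siftA fuel (PySem.List.pySetD (PySem.List.pySetD heap parent hi) idx hp) parent
        else idx
      | _, _ => idx   -- IndexError in Python; outside Pre_

def sift_up (heap : List Int) (idx : Int) : Int := siftA (idx.natAbs + 2) heap idx

-- ===== PORT B =====
-- while i > 1 and heap[i // 2] > v: heap[i] = heap[i // 2]; i //= 2   (fuel as above)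
def siftBLoop (fuel : Nat) (heap : List Int) (i : Int) (v : Int) : List Int × Int :=
  match fuel with
  | 0 => (heap, i)
  | fuel + 1 =>
    if 1 < i then
      let p := PySem.Int.floordiv i 2
      let hp := PySem.List.pyGetD heap p 0
      if hp > v then siftBLoop fuel (PySem.List.pySetD heap i hp) p v
      else (heap, i)
    else (heap, i)

def sift_up_alt (heap : List Int) (idx : Int) : Int :=
  let v := PySem.List.pyGetD heap idx 0          -- v = heap[idx] (IndexError outside Pre_)
  let r := siftBLoop (idx.natAbs + 2) heap idx v
  let _heap := PySem.List.pySetD r.1 r.2 v       -- heap[i] = v (mutation only, not returned)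
  r.2

-- ===== PRECONDITION & SPEC =====
-- Pre_ = idx is a valid Python index into heap: outside it B's up-front read heap[idx] raises
-- IndexError (A also raises there except when idx == 1, where A returns 1 before any indexing —
-- those inputs are the excluded-but-A-returns corner cited in the claim).
def Pre_sift_up (heap : List Int) (idx : Int) : Prop := PySem.Raise.InRange heap.length idx
instance (heap : List Int) (idx : Int) : Decidable (Pre_sift_up heap idx) := by unfold Pre_sift_up; infer_instance

def pvWitness_sift_up : List Int × Int := ([4, 1, 2, 3], 3)

-- For idx < -1 with heap[idx//2] > heap[idx] (negative-index wraparound), A swaps elements at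
-- Python's wrapped negative positions and returns the end of that swap chain, while B treats any
-- index not strictly above the root as already placed and returns idx unchanged; sifting at a
-- negative heap index is meaningless for a 1-based heap, so B's no-op is the intended behaviour.
def D_sift_up (heap : List Int) (idx : Int) : Prop :=
  idx < -1 ∧ PySem.List.pyGetD heap (PySem.Int.floordiv idx 2) 0 > PySem.List.pyGetD heap idx 0
instance (heap : List Int) (idx : Int) : Decidable (D_sift_up heap idx) := by unfold D_sift_up; infer_instance

def Spec_sift_up (heap : List Int) (idx : Int) (out : Int) : Prop := ¬ D_sift_up heap idx → out = sift_up_alt heap idx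
instance (heap : List Int) (idx : Int) (out : Int) : Decidable (Spec_sift_up heap idx out) := by unfold Spec_sift_up; infer_instance

def pvDiffWitness_sift_up : List Int × Int := ([0, 3, 5], -2)
def pvDiffWitnessOut_sift_up : Int × Int := (-1, -2)

-- ===== CLAIM (what is proved, stated in full; the proofs are below) =====
def Claim_unchanged_sift_up : Prop := ∀ (heap : List Int) (idx : Int), Dom_sift_up heap idx → Pre_sift_up heap idx → Spec_sift_up heap idx (sift_up heap idx)
def Claim_changed_sift_up : Prop := Dom_sift_up (pvDiffWitness_sift_up.1) (pvDiffWitness_sift_up.2) ∧ Pre_sift_up (pvDiffWitness_sift_up.1) (pvDiffWitness_sift_up.2) ∧ D_sift_up (pvDiffWitness_sift_up.1) (pvDiffWitness_sift_up.2) ∧ sift_up (pvDiffWitness_sift_up.1) (pvDiffWitness_sift_up.2) = pvDiffWitnessOut_sift_up.1 ∧ sift_up_alt (pvDiffWitness_sift_up.1) (pvDiffWitness_sift_up.2) = pvDiffWitnessOut_sift_up.2 ∧ pvDiffWitnessOut_sift_up.1 ≠ pvDiffWitnessOut_sift_up.2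
def Claim_exact_sift_up : Prop := ∀ (heap : List Int) (idx : Int), Dom_sift_up heap idx → Pre_sift_up heap idx → D_sift_up heap idx → sift_up heap idx ≠ sift_up_alt heap idx

-- ===== LEMMAS AND PROOFS =====

-- one-step unfolding lemmas for the fuelled loops (used by the proofs below)
lemma siftA_succ (f : Nat) (heap : List Int) (idx : Int) :
    siftA (f+1) heap idx =
      if idx = 1 then idx
      else
        match PySem.List.pyGet? heap (PySem.Int.floordiv idx 2), PySem.List.pyGet? heap idx with
        | some hp, some hi =>
          if hp > hi then
            siftA f (PySem.List.pySetD (PySem.List.pySetD heap (PySem.Int.floordiv idx 2) hi) idx hp) (PySem.Int.floordiv idx 2)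
          else idx
        | _, _ => idx := rfl

lemma siftB_succ (f : Nat) (heap : List Int) (i v : Int) :
    siftBLoop (f+1) heap i v =
      if 1 < i then
        if PySem.List.pyGetD heap (PySem.Int.floordiv i 2) 0 > v then
          siftBLoop f (PySem.List.pySetD heap i (PySem.List.pyGetD heap (PySem.Int.floordiv i 2) 0)) (PySem.Int.floordiv i 2) v
        else (heap, i)
      else (heap, i) := rfl

-- B returns its argument whenever it is not strictly above the root
lemma alt_of_not_lt (heap : List Int) (idx : Int) (h : ¬ 1 < idx) : sift_up_alt heap idx = idx := by
  show (siftBLoop ((idx.natAbs + 1) + 1) heap idx (PySem.List.pyGetD heap idx 0)).2 = idx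
  rw [siftB_succ, if_neg h]

-- Invariant tying the two loops together for positions above the root: if A's heap is B's heap
-- with the carried value v written back into the hole at jn, both runs return the same index.
lemma loop_eq : ∀ (f : Nat) (hB : List Int) (jn : Nat) (v : Int),
    1 ≤ jn → jn < hB.length →
    siftA f (hB.set jn v) (jn : Int) = (siftBLoop f hB (jn : Int) v).2 := by
  intro f
  induction f with
  | zero => intro hB jn v _ _; rfl
  | succ f ih =>
    intro hB jn v h1 h2
    by_cases hj : jn = 1
    · subst hj; simp [siftA_succ, siftB_succ]
    · have hj2 : 2 ≤ jn := by omega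
      have hfd : PySem.Int.floordiv (jn : Int) 2 = ((jn / 2 : Nat) : Int) := by
        exact_mod_cast PySem.Int.floordiv_natCast jn 2
      have hp1 : 1 ≤ jn / 2 := by omega
      have hpl : jn / 2 < hB.length := by omega
      have hne : jn ≠ jn / 2 := by omega
      have hgetp : (hB.set jn v)[jn/2]? = some hB[jn/2] := by
        rw [List.getElem?_set_ne hne]; exact List.getElem?_eq_getElem hpl
      have hgetj : (hB.set jn v)[jn]? = some v := by simp [h2]
      rw [siftA_succ, siftB_succ, if_neg (by exact_mod_cast hj : ¬((jn:Int) = 1)),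
        if_pos (by exact_mod_cast (by omega : 1 < jn) : (1:Int) < (jn:Int)), hfd]
      simp only [PySem.List.pyGet?_natCast, PySem.List.pyGetD_natCast, PySem.List.pySetD_natCast]
      rw [hgetp, hgetj]
      dsimp only
      have hBg : hB.getD (jn/2) 0 = hB[jn/2] := List.getD_eq_getElem hB 0 hpl
      rw [hBg]
      by_cases hcmp : hB[jn/2] > v
      · rw [if_pos hcmp, if_pos hcmp]
        have harg : ((hB.set jn v).set (jn/2) v).set jn hB[jn/2]
            = (hB.set jn hB[jn/2]).set (jn/2) v := by
          rw [List.set_comm v v hne, List.set_set]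
          exact List.set_comm v hB[jn/2] (Ne.symm hne)
        rw [harg]
        exact ih (hB.set jn hB[jn/2]) (jn/2) v hp1 (by simpa using hpl)
      · rw [if_neg hcmp, if_neg hcmp]

-- A's result is ≥ its argument whenever the argument is negative (the swap chain moves towards -1)
lemma siftA_ge_of_neg : ∀ (f : Nat) (h : List Int) (j : Int), j < 0 → j ≤ siftA f h j := by
  intro f
  induction f with
  | zero => intro h j hj; simp [siftA]
  | succ f ih =>
    intro h j hj
    rw [siftA_succ, if_neg (by omega : ¬ j = 1)]
    have hfd : PySem.Int.floordiv j 2 = j / 2 := PySem.Int.floordiv_eq_ediv_of_pos (by norm_num)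
    rw [hfd]
    cases ha : PySem.List.pyGet? h (j / 2) with
    | none => simp
    | some a =>
      cases hb : PySem.List.pyGet? h j with
      | none => simp
      | some b =>
        dsimp only
        by_cases hcmp : a > b
        · rw [if_pos hcmp]
          have := ih (PySem.List.pySetD (PySem.List.pySetD h (j/2) b) j a) (j/2) (by omega)
          omega
        · rw [if_neg hcmp]

-- under Pre_, every valid python index yields a value, and pyGetD agrees with it
lemma pyGet_some_of_range (heap : List Int) (i : Int)
    (h1 : -(heap.length:Int) ≤ i) (h2 : i < heap.length) :
    PySem.List.pyGet? heap i = some (PySem.List.pyGetD heap i 0) := by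
  have hne : PySem.List.pyGet? heap i ≠ none := by
    intro hc
    rw [PySem.List.pyGet?_eq_none_iff] at hc
    exact hc ⟨h1, h2⟩
  obtain ⟨a, ha⟩ := Option.ne_none_iff_exists'.mp hne
  rw [ha]
  simp [PySem.List.pyGetD, ha]

-- ===== VERDICT (by name: the statement is the Claim_ definition above) =====
theorem sift_up_spec : Claim_unchanged_sift_up := by
  unfold Claim_unchanged_sift_up
  intro heap idx _ hpre hnd
  have hrange : -(heap.length:Int) ≤ idx ∧ idx < heap.length := hpre
  by_cases hpos : 1 ≤ idx
  · -- positive index: the hole-shift invariant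
    obtain ⟨n, rfl⟩ : ∃ n : Nat, idx = (n : Int) := ⟨idx.toNat, by omega⟩
    have h1 : 1 ≤ n := by exact_mod_cast hpos
    have h2 : n < heap.length := by exact_mod_cast hrange.2
    show sift_up heap n = sift_up_alt heap n
    unfold sift_up sift_up_alt
    simp only [PySem.List.pyGetD_natCast]
    have hset : heap.set n (heap.getD n 0) = heap := by
      rw [List.getD_eq_getElem heap 0 h2]; exact List.set_getElem_self h2
    calc siftA ((n:Int).natAbs + 2) heap (n:Int)
        = siftA ((n:Int).natAbs + 2) (heap.set n (heap.getD n 0)) (n:Int) := by rw [hset]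
      _ = (siftBLoop ((n:Int).natAbs + 2) heap (n:Int) (heap.getD n 0)).2 :=
          loop_eq _ heap n _ h1 h2
  · -- idx ≤ 0: B is the identity, and A takes no step (its comparison fails)
    rw [alt_of_not_lt heap idx (by omega)]
    have hne1 : idx ≠ 1 := by omega
    unfold sift_up
    rw [show idx.natAbs + 2 = (idx.natAbs + 1) + 1 from rfl, siftA_succ, if_neg hne1]
    have hfd : PySem.Int.floordiv idx 2 = idx / 2 := PySem.Int.floordiv_eq_ediv_of_pos (by norm_num)
    by_cases h0 : -1 ≤ idx
    · -- idx = 0 or idx = -1: parent = idx, the strict comparison is irreflexive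
      have hpid : idx / 2 = idx := by omega
      rw [hfd, hpid, pyGet_some_of_range heap idx hrange.1 hrange.2]
      simp
    · -- idx ≤ -2: ¬D_ says exactly that the comparison fails
      have hpr1 : -(heap.length:Int) ≤ idx / 2 := by omega
      have hpr2 : idx / 2 < heap.length := by omega
      rw [hfd, pyGet_some_of_range heap (idx/2) hpr1 hpr2,
        pyGet_some_of_range heap idx hrange.1 hrange.2]
      dsimp only
      have hcmp : ¬ (PySem.List.pyGetD heap (idx/2) 0 > PySem.List.pyGetD heap idx 0) := by
        intro hc
        exact hnd ⟨by omega, by rwa [hfd]⟩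
      rw [if_neg hcmp]

theorem sift_up_changed : Claim_changed_sift_up := by unfold Claim_changed_sift_up; decide

theorem sift_up_tight : Claim_exact_sift_up := by
  unfold Claim_exact_sift_up
  intro heap idx _ hpre hD
  obtain ⟨hlt, hcmp⟩ := hD
  have hrange : -(heap.length:Int) ≤ idx ∧ idx < heap.length := hpre
  rw [alt_of_not_lt heap idx (by omega)]
  have hfd : PySem.Int.floordiv idx 2 = idx / 2 := PySem.Int.floordiv_eq_ediv_of_pos (by norm_num)
  have hpr1 : -(heap.length:Int) ≤ idx / 2 := by omega
  have hpr2 : idx / 2 < heap.length := by omega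
  unfold sift_up
  rw [show idx.natAbs + 2 = (idx.natAbs + 1) + 1 from rfl, siftA_succ,
    if_neg (by omega : ¬ idx = 1), hfd,
    pyGet_some_of_range heap (idx/2) hpr1 hpr2,
    pyGet_some_of_range heap idx hrange.1 hrange.2]
  dsimp only
  rw [if_pos (by rwa [hfd] at hcmp)]
  have := siftA_ge_of_neg (idx.natAbs + 1)
    (PySem.List.pySetD (PySem.List.pySetD heap (idx/2) (PySem.List.pyGetD heap idx 0)) idx (PySem.List.pyGetD heap (idx/2) 0))
    (idx/2) (by omega)
  omega
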